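-- pv_equiv track=rewrite | github.com/delphix/dxi-mcp-server | src/dct_mcp_server/toolsgenerator/driver.py | _get_module_for_path
-- ===== SOURCE A (Python) =====
-- def _get_module_for_path(api_path: str) -> str:
--     """Determine module name based on API path."""
--     path_to_module = {
--         # Dataset endpoints
--         "/vdbs": "dataset_endpoints",
--         "/vdb-groups": "dataset_endpoints",
--         "/dsources": "dataset_endpoints",
--         "/snapshots": "dataset_endpoints",
--         "/bookmarks": "dataset_endpoints",
--         "/sources": "dataset_endpoints",
--         "/data-connections": "dataset_endpoints",
--         "/timeflows": "dataset_endpoints",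
--
--         # Job endpoints
--         "/jobs": "job_endpoints",
--
--         # Environment endpoints
--         "/environments": "environment_endpoints",
--         "/toolkits": "environment_endpoints",
--
--         # Engine endpoints
--         "/management/engines": "engine_endpoints",
--         "/engines": "engine_endpoints",
--
--         # Compliance endpoints
--         "/masking": "compliance_endpoints",
--         "/connectors": "compliance_endpoints",
--         "/executions": "compliance_endpoints",
--         "/algorithms": "compliance_endpoints",
--
--         # Reports endpoints
--         "/reporting": "reports_endpoints",
--         "/reports": "reports_endpoints",
--
--         # IAM endpoints (accounts, roles, access-groups, api-clients)
--         "/management/accounts": "iam_endpoints",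
--         "/roles": "iam_endpoints",
--         "/access-groups": "iam_endpoints",
--         "/management/api-clients": "iam_endpoints",
--         "/management/tags": "iam_endpoints",
--
--         # Policy endpoints (replication, virtualization policies)
--         "/replication-profiles": "policy_endpoints",
--         "/virtualization-policies": "policy_endpoints",
--
--         # Admin/Platform endpoints (AI, telemetry, SMTP, LDAP, SAML, proxy, license, properties)
--         "/ai": "admin_endpoints",
--         "/management/properties": "admin_endpoints",
--         "/management/telemetry": "admin_endpoints",
--         "/management/smtp": "admin_endpoints",
--         "/management/ldap-config": "admin_endpoints",
--         "/management/saml-config": "admin_endpoints",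
--         "/management/proxy-configuration": "admin_endpoints",
--         "/management/license": "admin_endpoints",
--
--         # Template endpoints
--         "/database-templates": "template_endpoints",
--         "/hook-templates": "template_endpoints",
--     }
--
--     # Check from most specific to least specific (longer paths first)
--     for prefix in sorted(path_to_module.keys(), key=len, reverse=True):
--         if api_path.startswith(prefix):
--             return path_to_module[prefix]
--     return "misc_endpoints"
-- ===== SOURCE B (Python) =====
-- def _get_module_for_path(api_path: str) -> str:
--     """Determine module name based on API path."""
--     # inverted index: module -> its path prefixes; no key of the original table is a
--     # prefix of another key, so at most one prefix anywhere matches and scan order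
--     # (hence A's sort-by-length) is irrelevant.
--     groups = [
--         ("dataset_endpoints", ("/vdbs", "/vdb-groups", "/dsources", "/snapshots",
--                                "/bookmarks", "/sources", "/data-connections", "/timeflows")),
--         ("job_endpoints", ("/jobs",)),
--         ("environment_endpoints", ("/environments", "/toolkits")),
--         ("engine_endpoints", ("/management/engines", "/engines")),
--         ("compliance_endpoints", ("/masking", "/connectors", "/executions", "/algorithms")),
--         ("reports_endpoints", ("/reporting", "/reports")),
--         ("iam_endpoints", ("/management/accounts", "/roles", "/access-groups",
--                            "/management/api-clients", "/management/tags")),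
--         ("policy_endpoints", ("/replication-profiles", "/virtualization-policies")),
--         ("admin_endpoints", ("/ai", "/management/properties", "/management/telemetry",
--                              "/management/smtp", "/management/ldap-config", "/management/saml-config",
--                              "/management/proxy-configuration", "/management/license")),
--         ("template_endpoints", ("/database-templates", "/hook-templates")),
--     ]
--     for module, prefixes in groups:
--         if api_path.startswith(prefixes):
--             return module
--     return "misc_endpoints"
-- ===== Notes on version B (the rewrite author's own statement) =====
-- stated objective: idiomatic
-- what changed: Replaces A's path->module dict plus per-call sort-by-length and dict lookup with an inverted index (module -> tuple of prefixes) scanned once using str.startswith(tuple): since no key is a prefix of another, at most one prefix matches and the sort is unnecessary.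
import Mathlib
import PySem

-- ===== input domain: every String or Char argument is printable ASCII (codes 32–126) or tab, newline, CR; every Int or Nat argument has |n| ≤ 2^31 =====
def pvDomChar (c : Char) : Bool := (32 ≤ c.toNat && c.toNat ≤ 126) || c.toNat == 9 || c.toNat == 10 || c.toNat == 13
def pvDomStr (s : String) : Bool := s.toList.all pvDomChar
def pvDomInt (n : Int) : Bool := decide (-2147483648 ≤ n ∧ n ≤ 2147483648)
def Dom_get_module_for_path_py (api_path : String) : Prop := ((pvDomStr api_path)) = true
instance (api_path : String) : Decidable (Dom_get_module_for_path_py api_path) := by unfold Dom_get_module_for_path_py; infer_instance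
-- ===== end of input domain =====

-- B replaces A's path->module dict + per-call sort-by-length + dict lookup with an inverted
-- index (module -> its prefixes) scanned once; correct because no key is a prefix of another,
-- so at most one prefix matches (objective: idiomatic, no sort and no dict).

-- ===== PORT A =====
-- the dict literal A carries, as an insertion-ordered association list
def pvTable : List (String × String) := [
  ("/vdbs", "dataset_endpoints"),
  ("/vdb-groups", "dataset_endpoints"),
  ("/dsources", "dataset_endpoints"),
  ("/snapshots", "dataset_endpoints"),
  ("/bookmarks", "dataset_endpoints"),
  ("/sources", "dataset_endpoints"),
  ("/data-connections", "dataset_endpoints"),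
  ("/timeflows", "dataset_endpoints"),
  ("/jobs", "job_endpoints"),
  ("/environments", "environment_endpoints"),
  ("/toolkits", "environment_endpoints"),
  ("/management/engines", "engine_endpoints"),
  ("/engines", "engine_endpoints"),
  ("/masking", "compliance_endpoints"),
  ("/connectors", "compliance_endpoints"),
  ("/executions", "compliance_endpoints"),
  ("/algorithms", "compliance_endpoints"),
  ("/reporting", "reports_endpoints"),
  ("/reports", "reports_endpoints"),
  ("/management/accounts", "iam_endpoints"),
  ("/roles", "iam_endpoints"),
  ("/access-groups", "iam_endpoints"),
  ("/management/api-clients", "iam_endpoints"),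
  ("/management/tags", "iam_endpoints"),
  ("/replication-profiles", "policy_endpoints"),
  ("/virtualization-policies", "policy_endpoints"),
  ("/ai", "admin_endpoints"),
  ("/management/properties", "admin_endpoints"),
  ("/management/telemetry", "admin_endpoints"),
  ("/management/smtp", "admin_endpoints"),
  ("/management/ldap-config", "admin_endpoints"),
  ("/management/saml-config", "admin_endpoints"),
  ("/management/proxy-configuration", "admin_endpoints"),
  ("/management/license", "admin_endpoints"),
  ("/database-templates", "template_endpoints"),
  ("/hook-templates", "template_endpoints")
]

-- 'for prefix in sorted(d.keys(), key=len, reverse=True): if api_path.startswith(prefix): return d[prefix]'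
-- d[prefix] can never raise here (prefix is drawn from d.keys()), so '(d.get? k).getD' is exact.
def pvLoopA (s : String) (d : PySem.Dict String String) : List String → String
  | [] => "misc_endpoints"
  | k :: rest =>
      if PySem.Str.startswith s k then (d.get? k).getD "misc_endpoints" else pvLoopA s d rest

def get_module_for_path_py (api_path : String) : String :=
  let d : PySem.Dict String String := PySem.Dict.ofList pvTable
  pvLoopA api_path d (PySem.List.sorted d.keys (fun k => PySem.Str.len k) true)

-- ===== PORT B =====
-- B's inverted index: module -> its prefixes, in Source B's order
def pvGroups : List (String × List String) := [
  ("dataset_endpoints", ["/vdbs", "/vdb-groups", "/dsources", "/snapshots",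
                         "/bookmarks", "/sources", "/data-connections", "/timeflows"]),
  ("job_endpoints", ["/jobs"]),
  ("environment_endpoints", ["/environments", "/toolkits"]),
  ("engine_endpoints", ["/management/engines", "/engines"]),
  ("compliance_endpoints", ["/masking", "/connectors", "/executions", "/algorithms"]),
  ("reports_endpoints", ["/reporting", "/reports"]),
  ("iam_endpoints", ["/management/accounts", "/roles", "/access-groups",
                     "/management/api-clients", "/management/tags"]),
  ("policy_endpoints", ["/replication-profiles", "/virtualization-policies"]),
  ("admin_endpoints", ["/ai", "/management/properties", "/management/telemetry",
                       "/management/smtp", "/management/ldap-config", "/management/saml-config",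
                       "/management/proxy-configuration", "/management/license"]),
  ("template_endpoints", ["/database-templates", "/hook-templates"])
]

-- 'for module, prefixes in groups: if api_path.startswith(prefixes): return module'
-- (str.startswith with a tuple = any of its members is a prefix)
def pvLoopB (s : String) : List (String × List String) → String
  | [] => "misc_endpoints"
  | (m, ks) :: rest =>
      if ks.any (fun p => PySem.Str.startswith s p) then m else pvLoopB s rest

def get_module_for_path_py_alt (api_path : String) : String :=
  pvLoopB api_path pvGroups

-- ===== PRECONDITION & SPEC =====
def Spec_get_module_for_path_py (api_path : String) (out : String) : Prop := out = get_module_for_path_py_alt api_path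
instance (api_path : String) (out : String) : Decidable (Spec_get_module_for_path_py api_path out) := by unfold Spec_get_module_for_path_py; infer_instance

-- ===== CLAIM (what is proved, stated in full; the proofs are below) =====
def Claim_equal_get_module_for_path_py : Prop := ∀ (api_path : String), Dom_get_module_for_path_py api_path → Spec_get_module_for_path_py api_path (get_module_for_path_py api_path)

-- ===== LEMMAS AND PROOFS =====

-- the key column of A's table
def pvKeys : List String := pvTable.map Prod.fst

-- building the dict from the literal pairs (keys are distinct) yields the pairs unchanged
set_option maxRecDepth 8192 in
theorem pv_ofList_eq : PySem.Dict.ofList pvTable = PySem.Dict.mk pvTable := by decide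

-- the keys are pairwise distinct
set_option maxRecDepth 8192 in
theorem pv_nodup : (pvTable.map Prod.fst).Nodup := by decide

-- B's inverted index flattens back to A's table, pair for pair
set_option maxRecDepth 8192 in
theorem pv_flatten :
    pvGroups.flatMap (fun g => g.2.map (fun k => (k, g.1))) = pvTable := by decide

-- no key of the table is a proper prefix of another key
set_option maxRecDepth 8192 in
theorem pv_no_prefix : ∀ k1 ∈ pvKeys, ∀ k2 ∈ pvKeys, k1 ≠ k2 → ¬ (k1.toList <+: k2.toList) := by
  decide

-- at most one key can be a prefix of a given path
theorem pv_unique {s k1 k2 : String} (h1 : k1 ∈ pvKeys) (h2 : k2 ∈ pvKeys)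
    (m1 : PySem.Str.startswith s k1 = true) (m2 : PySem.Str.startswith s k2 = true) :
    k1 = k2 := by
  by_contra hne
  rw [PySem.Str.startswith_eq, PySem.Chars.startswith_iff] at m1 m2
  rcases List.prefix_or_prefix_of_prefix m1 m2 with h | h
  · exact pv_no_prefix k1 h1 k2 h2 hne h
  · exact pv_no_prefix k2 h2 k1 h1 (Ne.symm hne) h

-- distinct keys determine the value of a pair in the list
theorem pv_val_unique {l : List (String × String)} (hnd : (l.map Prod.fst).Nodup)
    {k : String} {v1 v2 : String} (h1 : (k, v1) ∈ l) (h2 : (k, v2) ∈ l) : v1 = v2 := by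
  induction l with
  | nil => cases h1
  | cons p t ih =>
    simp only [List.map_cons, List.nodup_cons] at hnd
    obtain ⟨a, b⟩ := p
    rcases List.mem_cons.mp h1 with h | h1' <;> rcases List.mem_cons.mp h2 with g | h2'
    · injection h with hk hv; injection g with gk gv; exact hv.trans gv.symm
    · injection h with hk hv
      exact absurd (hk ▸ List.mem_map.mpr ⟨(k, v2), h2', rfl⟩) hnd.1
    · injection g with gk gv
      exact absurd (gk ▸ List.mem_map.mpr ⟨(k, v1), h1', rfl⟩) hnd.1
    · exact ih hnd.2 h1' h2'

-- first-match lookup of a present key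
theorem pv_get?_of_mem {l : List (String × String)} (hnd : (l.map Prod.fst).Nodup)
    {k v : String} (h : (k, v) ∈ l) : (PySem.Dict.mk l).get? k = some v := by
  induction l with
  | nil => cases h
  | cons p t ih =>
    obtain ⟨a, b⟩ := p
    simp only [List.map_cons, List.nodup_cons] at hnd
    rw [PySem.Dict.get?_mk_cons]
    rcases List.mem_cons.mp h with hh | h'
    · obtain ⟨rfl, rfl⟩ := Prod.mk.injEq .. ▸ hh
      simp
    · by_cases hak : a = k
      · subst hak
        exact absurd (List.mem_map.mpr ⟨(a, v), h', rfl⟩) hnd.1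
      · simp only [beq_iff_eq, if_neg hak]
        exact ih hnd.2 h'

-- a pair of the table lies in some group of the inverted index
theorem pv_pair_to_group {k v : String} (h : (k, v) ∈ pvTable) :
    ∃ g ∈ pvGroups, k ∈ g.2 ∧ g.1 = v := by
  rw [← pv_flatten] at h
  obtain ⟨g, hg, hmem⟩ := List.mem_flatMap.mp h
  obtain ⟨k', hk', heq⟩ := List.mem_map.mp hmem
  obtain ⟨rfl, rfl⟩ := Prod.mk.injEq .. ▸ heq
  exact ⟨g, hg, hk', rfl⟩
-- and conversely every prefix of a group corresponds to a table pair
theorem pv_group_to_pair {g : String × List String} (hg : g ∈ pvGroups)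
    {k : String} (hk : k ∈ g.2) : (k, g.1) ∈ pvTable := by
  rw [← pv_flatten]
  exact List.mem_flatMap.mpr ⟨g, hg, List.mem_map.mpr ⟨k, hk, rfl⟩⟩

-- A's loop: no prefix matches
theorem pv_loopA_none {s : String} {d : PySem.Dict String String} {l : List String}
    (h : ∀ k ∈ l, ¬ PySem.Str.startswith s k = true) : pvLoopA s d l = "misc_endpoints" := by
  induction l with
  | nil => rfl
  | cons k t ih =>
    simp only [pvLoopA, if_neg (h k (List.mem_cons_self ..))]
    exact ih fun x hx => h x (List.mem_cons_of_mem _ hx)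

-- A's loop: the unique matching prefix is found
theorem pv_loopA_find {s : String} {d : PySem.Dict String String} {l : List String} {k0 : String}
    (hk : k0 ∈ l) (hm : PySem.Str.startswith s k0 = true)
    (hu : ∀ k ∈ l, PySem.Str.startswith s k = true → k = k0) :
    pvLoopA s d l = (d.get? k0).getD "misc_endpoints" := by
  induction l with
  | nil => cases hk
  | cons a t ih =>
    by_cases ha : PySem.Str.startswith s a = true
    · have : a = k0 := hu a (List.mem_cons_self ..) ha
      subst this
      simp only [pvLoopA]
      rw [if_pos ha]
    · have hk' : k0 ∈ t := by
        rcases List.mem_cons.mp hk with rfl | h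
        · exact absurd hm ha
        · exact h
      simp only [pvLoopA, if_neg ha]
      exact ih hk' fun x hx => hu x (List.mem_cons_of_mem _ hx)

-- B's loop: no group contains a matching prefix
theorem pv_loopB_none {s : String} {gs : List (String × List String)}
    (h : ∀ g ∈ gs, ∀ k ∈ g.2, ¬ PySem.Str.startswith s k = true) :
    pvLoopB s gs = "misc_endpoints" := by
  induction gs with
  | nil => rfl
  | cons g t ih =>
    obtain ⟨m, ks⟩ := g
    have hany : ks.any (fun p => PySem.Str.startswith s p) = false :=
      List.any_eq_false.mpr fun k hk => h (m, ks) (List.mem_cons_self ..) k hk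
    simp only [pvLoopB, hany, Bool.false_eq_true, if_false]
    exact ih fun g hg => h g (List.mem_cons_of_mem _ hg)

-- B's loop: some group matches, and every matching group carries module m0
theorem pv_loopB_find {s : String} {gs : List (String × List String)} {g0 : String × List String}
    (hg : g0 ∈ gs) (hm : ∃ k ∈ g0.2, PySem.Str.startswith s k = true)
    (hu : ∀ g ∈ gs, (∃ k ∈ g.2, PySem.Str.startswith s k = true) → g.1 = g0.1) :
    pvLoopB s gs = g0.1 := by
  induction gs with
  | nil => cases hg
  | cons g t ih =>
    obtain ⟨m, ks⟩ := g
    by_cases hany : ks.any (fun p => PySem.Str.startswith s p) = true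
    · simp only [pvLoopB, hany, if_true]
      exact hu (m, ks) (List.mem_cons_self ..) (by simpa using List.any_eq_true.mp hany)
    · simp only [pvLoopB, hany]
      have hg' : g0 ∈ t := by
        rcases List.mem_cons.mp hg with rfl | h
        · obtain ⟨k, hk, hks⟩ := hm
          exact absurd (List.any_eq_true.mpr ⟨k, hk, hks⟩) hany
        · exact h
      exact ih hg' fun g hgt => hu g (List.mem_cons_of_mem _ hgt)

-- ===== VERDICT (by name: the statement is the Claim_ definition above) =====
theorem get_module_for_path_py_spec : Claim_equal_get_module_for_path_py := by
  intro s _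
  unfold Spec_get_module_for_path_py get_module_for_path_py get_module_for_path_py_alt
  rw [pv_ofList_eq]
  show pvLoopA s (PySem.Dict.mk pvTable)
        (PySem.List.sorted pvKeys (fun k => PySem.Str.len k) true)
      = pvLoopB s pvGroups
  by_cases hex : ∃ k ∈ pvKeys, PySem.Str.startswith s k = true
  · obtain ⟨k0, hk0, hm⟩ := hex
    obtain ⟨⟨k, v0⟩, hp, hpk⟩ := List.mem_map.mp hk0
    obtain rfl : k = k0 := hpk
    have hA := pv_loopA_find (s := s) (d := PySem.Dict.mk pvTable)
      (l := PySem.List.sorted pvKeys (fun k => PySem.Str.len k) true)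
      ((PySem.List.mem_sorted ..).mpr hk0) hm
      (fun k' hk' hmk' => pv_unique ((PySem.List.mem_sorted ..).mp hk') hk0 hmk' hm)
    rw [hA, pv_get?_of_mem pv_nodup hp]
    obtain ⟨g0, hg0, hk0g, hmod⟩ := pv_pair_to_group hp
    rw [pv_loopB_find hg0 ⟨k, hk0g, hm⟩ (fun g hg hgm => by
      obtain ⟨k', hk'g, hk'm⟩ := hgm
      have hk'pair := pv_group_to_pair hg hk'g
      have : k' = k :=
        pv_unique (List.mem_map.mpr ⟨(k', g.1), hk'pair, rfl⟩) hk0 hk'm hm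
      subst this
      rw [hmod]
      exact pv_val_unique pv_nodup hk'pair hp), hmod]
    rfl
  · rw [not_exists] at hex
    simp only [not_and] at hex
    rw [pv_loopA_none (fun k hk => hex k ((PySem.List.mem_sorted ..).mp hk))]
    rw [pv_loopB_none (fun g hg k hk =>
      hex k (List.mem_map.mpr ⟨(k, g.1), pv_group_to_pair hg hk, rfl⟩))]
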